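-- pv_equiv track=rewrite | github.com/steventhan/code-katas | string_pyramid.py | watch_pyramid_from_above
-- ===== SOURCE A (Python) =====
-- def get_side_lines(characters):
--     """Get pyramid side lines."""
--     if len(characters) < 1:
--         raise ValueError('Pyramid can only be built with non-empty string.')
--     lines = []
--     num_characters = 1
--     while len(characters) >= 1:
--         lines.append(characters[-1] * num_characters)
--         num_characters += 2
--         characters = characters[:-1]
--     return lines
--
-- def watch_pyramid_from_above(characters):
--     """Get view from above."""
--     if not characters:
--         return characters
--     lines = get_side_lines(characters)
--     line_width = len(lines[-1])
--     lst = []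
--     for line in reversed(lines):
--         if len(line) == line_width:
--             lst.append(line)
--         else:
--             prev = lst[-1]
--             cutoff = int((line_width - len(line)) / 2)
--             left = prev[:cutoff]
--             right = prev[-cutoff:]
--             lst.append('{}{}{}'.format(left, line, right))
--     output = ''
--     for i in lst[:-1]:
--         output += i + '\n'
--     for idx, i in enumerate(reversed(lst)):
--         if idx == len(lst) - 1:
--             output += i
--         else:
--             output += i + '\n'
--     return output
-- ===== SOURCE B (Python) =====
-- def watch_pyramid_from_above(characters):
--     if not characters:
--         return characters
--     size = 2 * len(characters) - 1
--     rows = []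
--     for i in range(size):
--         k = min(i, size - 1 - i)
--         rows.append(characters[:k]
--                     + characters[k] * (size - 2 * k)
--                     + characters[:k][::-1])
--     return '\n'.join(rows)
-- ===== Notes on version B (the rewrite author's own statement) =====
-- stated objective: simpler
-- what changed: Replaces the build-side-lines/reverse/pad-each-line-from-the-previous-row/double-join pipeline with a direct closed form: row i of the (2n-1)-line view is characters[:k] + characters[k]*(size-2k) + characters[:k][::-1] with k = min(i, size-1-i), joined once with newlines.
import Mathlib
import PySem

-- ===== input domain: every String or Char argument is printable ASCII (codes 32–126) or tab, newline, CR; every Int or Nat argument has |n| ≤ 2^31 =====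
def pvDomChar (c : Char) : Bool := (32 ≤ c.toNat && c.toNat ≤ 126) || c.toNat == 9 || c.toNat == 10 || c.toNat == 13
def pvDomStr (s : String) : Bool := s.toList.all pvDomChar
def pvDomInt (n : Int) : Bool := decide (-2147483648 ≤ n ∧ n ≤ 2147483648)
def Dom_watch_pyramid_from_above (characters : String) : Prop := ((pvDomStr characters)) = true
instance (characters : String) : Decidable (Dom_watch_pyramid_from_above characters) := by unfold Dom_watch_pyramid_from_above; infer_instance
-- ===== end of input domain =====

-- B replaces A's build-side-lines/reverse/pad-from-previous-row/double-join pipeline by a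
-- per-cell closed form characters[min(i, j, size-1-i, size-1-j)] (objective: simpler).

-- ===== PORT A =====
-- get_side_lines: the ValueError branch is unreachable from watch_pyramid_from_above
-- (the caller returns early on empty input), so A never raises.
-- characters[-1] is ported as getLastD (list nonempty by the loop guard);
-- characters[:-1] is dropLast.
def gslA (cs : List Char) (num : Nat) : List (List Char) :=
  if 1 ≤ cs.length then
    List.replicate num (cs.getLastD ' ') :: gslA cs.dropLast (num + 2)
  else []
termination_by cs.length
decreasing_by simp [List.length_dropLast]; omega

-- the loop body building `lst`; prev[-cutoff:] is drop (len - cutoff) (cutoff > 0 on the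
-- reachable branch: line widths all have the parity of line_width)
def buildStepA (lw : Nat) (lst : List (List Char)) (line : List Char) : List (List Char) :=
  if line.length = lw then lst ++ [line]
  else lst ++ [(lst.getLastD []).take ((lw - line.length) / 2) ++ line ++
    (lst.getLastD []).drop ((lst.getLastD []).length - (lw - line.length) / 2)]

def watch_pyramid_from_above (characters : String) : String :=
  let cs := characters.toList
  if cs = [] then characters
  else
    let lines := gslA cs 1
    let lw := (lines.getLastD []).length
    let lst := lines.reverse.foldl (buildStepA lw) []
    let out1 := lst.dropLast.foldl (fun acc i => acc ++ i ++ ['\n']) []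
    let out2 := (PySem.List.enumerate lst.reverse 0).foldl
      (fun acc p => if p.1 = (lst.length : Int) - 1 then acc ++ p.2 else acc ++ p.2 ++ ['\n']) out1
    String.ofList out2

-- ===== PORT B =====
-- row i is characters[:k] + characters[k]*(size-2k) + characters[:k][::-1] with
-- k = min(i, size-1-i); characters[k] ported as getD (k < len always, so the
-- default is unreachable); characters[:k][::-1] is (take k).reverse
def watch_pyramid_from_above_alt (characters : String) : String :=
  let cs := characters.toList
  if cs = [] then characters
  else
    let size := 2 * cs.length - 1
    let rows := (List.range size).map (fun i =>
      cs.take (min i (size - 1 - i)) ++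
      List.replicate (size - 2 * min i (size - 1 - i)) (cs.getD (min i (size - 1 - i)) ' ') ++
      (cs.take (min i (size - 1 - i))).reverse)
    String.ofList (List.intercalate ['\n'] rows)

-- ===== PRECONDITION & SPEC =====
def Spec_watch_pyramid_from_above (characters : String) (out : String) : Prop := out = watch_pyramid_from_above_alt characters
instance (characters : String) (out : String) : Decidable (Spec_watch_pyramid_from_above characters out) := by unfold Spec_watch_pyramid_from_above; infer_instance

-- ===== CLAIM (what is proved, stated in full; the proofs are below) =====
def Claim_equal_watch_pyramid_from_above : Prop := ∀ (characters : String), Dom_watch_pyramid_from_above characters → Spec_watch_pyramid_from_above characters (watch_pyramid_from_above characters)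

-- ===== LEMMAS AND PROOFS =====

-- half-pyramid row k (k-th ring from the outside), as a row of the full grid
def rowHalf (cs : List Char) (k : Nat) : List Char :=
  (List.range (2 * cs.length - 1)).map
    (fun j => cs.getD (min k (min j (2 * cs.length - 1 - 1 - j))) ' ')

lemma gslA_eq (n : Nat) : ∀ (cs : List Char), cs.length = n → ∀ num,
    gslA cs num = (List.range n).map
      (fun k => List.replicate (num + 2 * k) (cs.getD (n - 1 - k) ' ')) := by
  induction n with
  | zero => intro cs h num; rw [gslA]; simp [h]
  | succ n ih =>
    intro cs h num
    rw [gslA]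
    have hne : cs ≠ [] := by intro hc; simp [hc] at h
    have hd : cs.dropLast.length = n := by simp [List.length_dropLast, h]
    rw [if_pos (by omega), ih cs.dropLast hd (num + 2)]
    rw [List.range_succ_eq_map]
    simp only [List.map_cons, List.map_map]
    congr 1
    · rw [List.getLastD_eq_getLast?, List.getLast?_eq_getElem?]
      rw [List.getElem?_eq_getElem (by omega)]
      rw [List.getD_eq_getElem?_getD, List.getElem?_eq_getElem (by omega)]
      simp
      right
      exact getElem_congr rfl (by omega) (by omega)
    · apply List.map_congr_left
      intro k hk
      simp only [Function.comp]
      congr 1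
      · omega
      · have hlt : n - 1 - k < cs.dropLast.length := by
          simp at hk; omega
        rw [List.getD_eq_getElem?_getD, List.getD_eq_getElem?_getD,
            List.getElem?_eq_getElem hlt, List.getElem_dropLast]
        have : n - 1 - k = n + 1 - 1 - (k + 1) := by omega
        rw [List.getElem?_eq_getElem (by omega)]
        simp [this]

lemma revMapRange {α : Type} (n : Nat) (f : Nat → α) :
    ((List.range n).map f).reverse = (List.range n).map (fun k => f (n - 1 - k)) := by
  apply List.ext_getElem
  · simp
  · intro i h1 h2
    simp only [List.length_map, List.length_range, List.length_reverse] at h1 h2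
    simp only [List.getElem_reverse, List.getElem_map, List.getElem_range,
      List.length_map, List.length_range]

lemma rowHalf_zero (cs : List Char) :
    rowHalf cs 0 = List.replicate (2 * cs.length - 1) (cs.getD 0 ' ') := by
  unfold rowHalf
  apply List.ext_getElem
  · simp
  · intro i h1 h2
    simp

lemma rowHalf_get (cs : List Char) (k i : Nat) (h : i < 2 * cs.length - 1) :
    (rowHalf cs k)[i]'(by simp [rowHalf]; omega) =
      cs.getD (min k (min i (2 * cs.length - 1 - 1 - i))) ' ' := by
  simp [rowHalf]

lemma rowHalf_step (cs : List Char) (m : Nat) (hm : 0 < m) (hmn : m < cs.length) :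
    rowHalf cs m =
      (rowHalf cs (m - 1)).take m ++
      List.replicate (2 * cs.length - 1 - 2 * m) (cs.getD m ' ') ++
      (rowHalf cs (m - 1)).drop ((rowHalf cs (m - 1)).length - m) := by
  have hL : (rowHalf cs (m - 1)).length = 2 * cs.length - 1 := by simp [rowHalf]
  apply List.ext_getElem
  · simp only [rowHalf, List.length_append, List.length_take, List.length_drop,
      List.length_replicate, List.length_map, List.length_range]
    omega
  · intro i h1 h2
    have hi : i < 2 * cs.length - 1 := by simpa [rowHalf] using h1
    rw [rowHalf_get cs m i hi]
    by_cases hc1 : i < 2 * cs.length - 1 - m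
    · rw [List.getElem_append_left (by simp [hL]; omega)]
      by_cases hc2 : i < m
      · rw [List.getElem_append_left (by simp [hL]; omega), List.getElem_take,
            rowHalf_get cs (m - 1) i hi]
        congr 1
        omega
      · rw [List.getElem_append_right (by simp [hL]; omega), List.getElem_replicate]
        congr 1
        omega
    · rw [List.getElem_append_right (by simp [hL]; omega), List.getElem_drop]
      have hJ : (rowHalf cs (m - 1)).length - m +
          (i - ((rowHalf cs (m - 1)).take m ++
            List.replicate (2 * cs.length - 1 - 2 * m) (cs.getD m ' ')).length) = i := by
        simp only [List.length_append, List.length_take, List.length_replicate, hL]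
        omega
      rw [getElem_congr rfl hJ (by simp only [List.length_append, List.length_take,
            List.length_replicate, hL]; omega), rowHalf_get cs (m - 1) i hi]
      congr 1
      omega

lemma foldl_build (cs : List Char) (hne : cs ≠ []) : ∀ m, m ≤ cs.length →
    ((List.range m).map
        (fun k => List.replicate (2 * cs.length - 1 - 2 * k) (cs.getD k ' '))).foldl
      (buildStepA (2 * cs.length - 1)) []
    = (List.range m).map (rowHalf cs) := by
  have hn : 1 ≤ cs.length := List.length_pos_iff.mpr hne
  intro m
  induction m with
  | zero => intro _; simp
  | succ m ih =>
    intro hm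
    rw [List.range_succ, List.map_append, List.foldl_append, ih (by omega),
        List.map_append]
    simp only [List.map_cons, List.map_nil, List.foldl_cons, List.foldl_nil]
    by_cases hm0 : m = 0
    · subst hm0
      simp [rowHalf_zero, List.length_replicate, buildStepA]
    · unfold buildStepA
      rw [if_neg (by simp [List.length_replicate]; omega)]
      have hprev : ((List.range m).map (rowHalf cs)).getLastD [] = rowHalf cs (m - 1) := by
        rw [List.getLastD_eq_getLast?, List.getLast?_eq_getElem?]
        rw [List.getElem?_eq_getElem (by simp; omega)]
        simp
      rw [hprev]
      have hcut : (2 * cs.length - 1 -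
          (List.replicate (2 * cs.length - 1 - 2 * m) (cs.getD m ' ')).length) / 2 = m := by
        simp only [List.length_replicate]
        omega
      rw [hcut, rowHalf_step cs m (by omega) (by omega)]

lemma foldl_append_nl : ∀ (xs : List (List Char)) (acc : List Char),
    xs.foldl (fun a i => a ++ i ++ ['\n']) acc = acc ++ (xs.map (· ++ ['\n'])).flatten := by
  intro xs
  induction xs with
  | nil => simp
  | cons y ys ih => intro acc; rw [List.foldl_cons, ih]; simp [List.append_assoc]

lemma enumFold (L : Nat) (x : List Char) : ∀ (xs : List (List Char)) (s : Int) (acc : List Char),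
    (s + xs.length : Int) = (L : Int) - 1 →
    (PySem.List.enumerate (xs ++ [x]) s).foldl
      (fun a p => if p.1 = (L : Int) - 1 then a ++ p.2 else a ++ p.2 ++ ['\n']) acc
    = acc ++ (xs.map (· ++ ['\n'])).flatten ++ x := by
  intro xs
  induction xs with
  | nil =>
    intro s acc hs
    simp only [List.nil_append, PySem.List.enumerate_cons, PySem.List.enumerate_nil]
    simp at hs
    simp [hs]
  | cons y ys ih =>
    intro s acc hs
    simp only [List.cons_append, PySem.List.enumerate_cons, List.foldl_cons]
    rw [if_neg (by simp at hs; omega)]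
    rw [ih (s + 1) _ (by simp at hs ⊢; omega)]
    simp [List.append_assoc]

lemma intercalate_last (sep : List Char) : ∀ (xs : List (List Char)) (x : List Char),
    List.intercalate sep (xs ++ [x]) = (xs.map (· ++ sep)).flatten ++ x := by
  intro xs
  induction xs with
  | nil => intro x; simp [List.intercalate]
  | cons y ys ih =>
    intro x
    cases ys with
    | nil => simp [List.intercalate]
    | cons z zs =>
      have := ih x
      simp [List.intercalate] at this ⊢
      simp [this]

-- a half-pyramid row in slice form (B's row formula)
lemma rowHalf_slice (cs : List Char) (k : Nat) (hk : k < cs.length) :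
    cs.take k ++ List.replicate (2 * cs.length - 1 - 2 * k) (cs.getD k ' ') ++
      (cs.take k).reverse = rowHalf cs k := by
  apply List.ext_getElem
  · simp [rowHalf]; omega
  · intro i h1 h2
    have hi : i < 2 * cs.length - 1 := by simpa [rowHalf] using h2
    rw [rowHalf_get cs k i hi]
    rw [List.getElem_append]
    split
    · rename_i hc
      rw [List.getElem_append]
      split
      · rename_i hc2
        simp only [List.length_take] at hc2
        rw [List.getElem_take, List.getD_eq_getElem cs ' ' (by omega)]
        exact (getElem_congr rfl (by omega) (by omega)).symm
      · rename_i hc2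
        simp only [List.length_take] at hc2
        rw [List.getElem_replicate]
        congr 1
        simp only [List.length_append, List.length_take, List.length_replicate] at hc
        omega
    · rename_i hc
      simp only [List.length_append, List.length_take, List.length_replicate] at hc
      rw [List.getElem_reverse, List.getElem_take]
      symm
      rw [List.getD_eq_getElem cs ' ' (by omega)]
      exact getElem_congr rfl
        (by simp only [List.length_take, List.length_append, List.length_replicate]; omega)
        (by omega)

-- rows of B = (dropLast lst) ++ reverse lst, with lst = half-pyramid rows
lemma rows_eq (cs : List Char) (hne : cs ≠ []) :
    (List.dropLast ((List.range cs.length).map (rowHalf cs))) ++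
      ((List.range cs.length).map (rowHalf cs)).reverse
    = (List.range (2 * cs.length - 1)).map (fun i =>
        cs.take (min i (2 * cs.length - 1 - 1 - i)) ++
        List.replicate (2 * cs.length - 1 - 2 * min i (2 * cs.length - 1 - 1 - i))
          (cs.getD (min i (2 * cs.length - 1 - 1 - i)) ' ') ++
        (cs.take (min i (2 * cs.length - 1 - 1 - i))).reverse) := by
  have hn : 1 ≤ cs.length := List.length_pos_iff.mpr hne
  have hrow : ∀ i, i < 2 * cs.length - 1 →
      cs.take (min i (2 * cs.length - 1 - 1 - i)) ++
        List.replicate (2 * cs.length - 1 - 2 * min i (2 * cs.length - 1 - 1 - i))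
          (cs.getD (min i (2 * cs.length - 1 - 1 - i)) ' ') ++
        (cs.take (min i (2 * cs.length - 1 - 1 - i))).reverse
      = rowHalf cs (min i (2 * cs.length - 1 - 1 - i)) := by
    intro i hi
    exact rowHalf_slice cs _ (by omega)
  apply List.ext_getElem
  · simp; omega
  · intro i h1 h2
    rw [List.getElem_map, List.getElem_range, hrow i (by simpa using h2)]
    rw [List.getElem_append]
    split
    · rename_i hi
      simp only [List.length_dropLast, List.length_map, List.length_range] at hi
      rw [List.getElem_dropLast, List.getElem_map, List.getElem_range]
      congr 1
      omega
    · rename_i hi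
      simp only [List.length_append, List.length_reverse, List.length_dropLast,
        List.length_map, List.length_range] at hi h1
      rw [List.getElem_reverse, List.getElem_map, List.getElem_range]
      simp only [List.length_map, List.length_range, List.length_dropLast]
      congr 1
      omega

lemma lines_eq (cs : List Char) :
    (gslA cs 1).reverse = (List.range cs.length).map
      (fun m => List.replicate (2 * cs.length - 1 - 2 * m) (cs.getD m ' ')) := by
  rw [gslA_eq cs.length cs rfl 1, revMapRange]
  apply List.map_congr_left
  intro k hk
  simp at hk
  congr 1
  · omega
  · congr 1; omega

lemma lw_eq (cs : List Char) (hne : cs ≠ []) :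
    ((gslA cs 1).getLastD []).length = 2 * cs.length - 1 := by
  have hn : 1 ≤ cs.length := List.length_pos_iff.mpr hne
  rw [gslA_eq cs.length cs rfl 1]
  rw [List.getLastD_eq_getLast?, List.getLast?_eq_getElem?]
  rw [List.getElem?_eq_getElem (by simp; omega)]
  simp
  omega

-- ===== VERDICT (by name: the statement is the Claim_ definition above) =====
theorem watch_pyramid_from_above_spec : Claim_equal_watch_pyramid_from_above := by
  intro characters _
  unfold Spec_watch_pyramid_from_above watch_pyramid_from_above watch_pyramid_from_above_alt
  set cs := characters.toList with hcs
  by_cases hne : cs = []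
  · simp [hne]
  · simp only [if_neg hne]
    have hn : 1 ≤ cs.length := List.length_pos_iff.mpr hne
    rw [lw_eq cs hne, lines_eq cs]
    rw [foldl_build cs hne cs.length (le_refl _)]
    set lst := (List.range cs.length).map (rowHalf cs) with hlst
    have hlstlen : lst.length = cs.length := by simp [hlst]
    have hlstne : lst ≠ [] := by
      intro h; rw [h] at hlstlen; simp at hlstlen; omega
    congr 1
    rw [foldl_append_nl]
    have hsplit : lst.reverse = lst.reverse.dropLast ++ [lst.reverse.getLast (by simpa using hlstne)] := by
      exact (List.dropLast_concat_getLast (by simpa using hlstne)).symm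
    rw [hsplit, enumFold lst.length (lst.reverse.getLast (by simpa using hlstne))
      lst.reverse.dropLast 0 _ (by
        have := List.length_pos_iff.mpr hlstne
        simp
        omega)]
    rw [← rows_eq cs hne, ← hlst]
    conv_rhs => rw [hsplit, ← List.append_assoc, intercalate_last ['\n']]
    rw [List.map_append, List.flatten_append]
    simp [List.append_assoc]
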